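-- pv_equiv track=rewrite | github.com/mjgomsa/comp431 | HW3/parser.py | findOccurances
-- ===== SOURCE A (Python) =====
-- def findOccurances(s, char):
--     iPosList = []
--     iPos = 0
--     while True:
--         try:
--             iPos = s.index(char, iPos)
--             iPosList.append(iPos)
--             iPos += 1
--         except ValueError as e:
--             break
--     return iPosList
-- ===== SOURCE B (Python) =====
-- def findOccurances(s, char):
--     return [i for i in range(len(s)) if s.startswith(char, i)]
-- ===== Notes on version B (the rewrite author's own statement) =====
-- stated objective: idiomatic
-- what changed: Replaces the try/except while-loop jumping via s.index(char, pos) with a single comprehension testing s.startswith(char, i) at every index; Pre_ excludes char == '', a corner where how many occurrences the empty substring has (A counts len(s)+1, B counts len(s)) is purely conventional.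
-- outside the precondition, e.g. on findOccurances('ab', ''): A returns [0, 1, 2], B returns [0, 1]
import Mathlib
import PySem

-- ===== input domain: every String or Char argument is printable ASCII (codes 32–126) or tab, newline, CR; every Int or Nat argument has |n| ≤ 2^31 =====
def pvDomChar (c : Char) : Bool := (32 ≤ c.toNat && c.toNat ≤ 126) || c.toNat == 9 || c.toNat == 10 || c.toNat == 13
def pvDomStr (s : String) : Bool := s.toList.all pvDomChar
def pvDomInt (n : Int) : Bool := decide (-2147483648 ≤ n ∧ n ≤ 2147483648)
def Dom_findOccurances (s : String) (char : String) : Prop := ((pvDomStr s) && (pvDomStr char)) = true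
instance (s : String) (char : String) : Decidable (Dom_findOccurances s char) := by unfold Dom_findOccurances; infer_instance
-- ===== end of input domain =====

-- B replaces A's try/except loop over s.index(char, pos) with a comprehension testing
-- startswith at every index of s; idiomatic, not faster. Pre_ excludes char == ''.


-- ===== PORT A =====
-- The while/try loop; fuel only makes the loop total (s.length + 2 steps suffice, since
-- iPos strictly increases and s.index(char, iPos) raises once iPos exceeds len(s)).
def findALoop (cs ch : List Char) : Nat → Int → List Int → List Int
  | 0, _, acc => acc.reverse
  | fuel + 1, iPos, acc =>
      let r := PySem.Chars.findFrom cs ch iPos    -- s.index(char, iPos); -1 = ValueError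
      if r = -1 then acc.reverse
      else findALoop cs ch fuel (r + 1) (r :: acc)

def findOccurances (s : String) (char : String) : List Int :=
  findALoop s.toList char.toList (s.toList.length + 2) 0 []

-- ===== PORT B =====
-- [i for i in range(len(s)) if s.startswith(char, i)]  (i ≥ 0, so the start slice is drop)
def findOccurances_alt (s : String) (char : String) : List Int :=
  (PySem.List.pyRange 0 (s.toList.length : Int)).filter
    (fun i => PySem.Chars.startswith (s.toList.drop i.toNat) char.toList)

-- ===== PRECONDITION & SPEC =====
-- Pre_ excludes char == '' (A still returns there): how many occurrences an empty
-- substring has is a pure convention (A yields [0..len(s)], B yields [0..len(s)-1]).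
def Pre_findOccurances (s : String) (char : String) : Prop := char ≠ ""
instance (s : String) (char : String) : Decidable (Pre_findOccurances s char) := by unfold Pre_findOccurances; infer_instance
def pvWitness_findOccurances : String × String := ("abcab", "ab")

def Spec_findOccurances (s : String) (char : String) (out : List Int) : Prop := out = findOccurances_alt s char
instance (s : String) (char : String) (out : List Int) : Decidable (Spec_findOccurances s char out) := by unfold Spec_findOccurances; infer_instance

-- ===== CLAIM (what is proved, stated in full; the proofs are below) =====
def Claim_equal_findOccurances : Prop := ∀ (s : String) (char : String), Dom_findOccurances s char → Pre_findOccurances s char → Spec_findOccurances s char (findOccurances s char)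

-- ===== LEMMAS AND PROOFS =====

theorem pyRange_one_eq_nil {a b : Int} (h : b ≤ a) : PySem.List.pyRange a b = [] := by
  simp [PySem.List.pyRange]
  intro h'
  omega

theorem filter_pyRange_eq_nil (p : Int → Bool) (a b : Int)
    (h : ∀ i, a ≤ i → i < b → p i = false) :
    (PySem.List.pyRange a b).filter p = [] := by
  by_cases hab : b ≤ a
  · rw [pyRange_one_eq_nil hab]; rfl
  · rw [not_le] at hab
    have hn : ((b - a).toNat) = b - a := by omega
    induction hd : (b - a).toNat generalizing a with
    | zero => omega
    | succ n ih =>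
      rw [PySem.List.pyRange_one_cons hab, List.filter_cons, h a le_rfl hab]
      simp only [Bool.false_eq_true, if_false]
      by_cases h2 : b ≤ a + 1
      · rw [pyRange_one_eq_nil h2]; rfl
      · rw [not_le] at h2
        exact ih (a + 1) (fun i h1 h2 => h i (by omega) h2) h2 (by omega) (by omega)

-- the loop invariant: from position k (0 ≤ k ≤ len+1), A's loop appends exactly the
-- positions i ∈ [k, len] at which char is a prefix of cs.drop i
theorem findALoop_eq (cs ch : List Char) (fuel k : Nat) (acc : List Int)
    (hk : k ≤ cs.length + 1) (hf : cs.length + 2 - k ≤ fuel) :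
    findALoop cs ch fuel (k : Int) acc =
      acc.reverse ++ (PySem.List.pyRange (k : Int) (cs.length + 1)).filter
        (fun i => PySem.Chars.startswith (cs.drop i.toNat) ch) := by
  induction fuel generalizing k acc with
  | zero => omega
  | succ fuel ih =>
    by_cases hk1 : k = cs.length + 1
    · -- start past len(s): s.index raises immediately, and the range is empty
      have hr : PySem.Chars.findFrom cs ch (k : Int) = -1 := by
        simp only [PySem.Chars.findFrom]
        rw [if_pos (by omega)]
      rw [pyRange_one_eq_nil (by omega)]
      simp [findALoop, hr]
    · have hklen : k ≤ cs.length := by omega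
      by_cases hr : PySem.Chars.findFrom cs ch (k : Int) = -1
      · -- ValueError: no occurrence at or after k; the filtered range is empty
        have hfil : (PySem.List.pyRange (k : Int) (cs.length + 1)).filter
            (fun i => PySem.Chars.startswith (cs.drop i.toNat) ch) = [] := by
          apply filter_pyRange_eq_nil
          intro i h1 h2
          have hin : k ≤ i.toNat ∧ i.toNat ≤ cs.length := by omega
          rw [Bool.eq_false_iff]
          intro hsw
          rw [PySem.Chars.startswith_iff] at hsw
          have : ch <:+: cs.drop k := by
            rw [List.infix_iff_prefix_suffix]
            refine ⟨cs.drop i.toNat, hsw, ?_⟩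
            have := List.drop_suffix (i.toNat - k) (cs.drop k)
            rwa [List.drop_drop, show k + (i.toNat - k) = i.toNat by omega] at this
          exact ((PySem.Chars.findFrom_natCast_eq_neg_one_iff cs ch k hklen).mp hr) this
        rw [hfil]
        simp [findALoop, hr]
      · -- found at r: k ≤ r ≤ len, no occurrence in [k, r), occurrence at r
        set r := PySem.Chars.findFrom cs ch (k : Int) with hrdef
        obtain ⟨hkr, hpre, hmin⟩ := PySem.Chars.findFrom_natCast_spec cs ch k hklen hr
        rw [← hrdef] at hkr hpre hmin
        have hrlen : r ≤ cs.length := by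
          rw [hrdef, PySem.Chars.findFrom_natCast cs ch k hklen]
          split
          · omega
          · have := PySem.Chars.find_le_length (cs.drop k) ch
            simp only [List.length_drop] at this
            omega
        have hr0 : 0 ≤ r := le_trans (by exact_mod_cast Nat.zero_le k) hkr
        have hrnat : ((r.toNat : Nat) : Int) = r := by omega
        simp only [findALoop, ← hrdef, if_neg hr]
        have hcast : r + 1 = ((r.toNat + 1 : Nat) : Int) := by omega
        rw [hcast, ih (r.toNat + 1) (r :: acc) (by omega) (by omega)]
        rw [PySem.List.pyRange_one_append (k : Int) r (cs.length + 1) (by omega) (by omega),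
          PySem.List.pyRange_one_cons (a := r) (b := (cs.length : Int) + 1) (by omega),
          List.filter_append, List.filter_cons]
        have hfilnil : (PySem.List.pyRange (k : Int) r).filter
            (fun i => PySem.Chars.startswith (cs.drop i.toNat) ch) = [] := by
          apply filter_pyRange_eq_nil
          intro i h1 h2
          rw [Bool.eq_false_iff]
          intro hsw
          rw [PySem.Chars.startswith_iff] at hsw
          exact hmin i.toNat (by omega) (by omega) hsw
        have hpr : PySem.Chars.startswith (cs.drop r.toNat) ch = true := by
          rw [PySem.Chars.startswith_iff]; exact hpre
        rw [hfilnil, hpr, ← hcast]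
        simp

-- ===== VERDICT (by name: the statement is the Claim_ definition above) =====
theorem findOccurances_spec : Claim_equal_findOccurances := by
  intro s char _ hpre
  unfold Spec_findOccurances findOccurances findOccurances_alt
  have hA := findALoop_eq s.toList char.toList (s.toList.length + 2) 0 []
    (by omega) (by omega)
  simp only [List.reverse_nil, List.nil_append] at hA
  rw [show ((0 : Nat) : Int) = 0 from rfl] at hA
  rw [hA]
  -- split A's range [0, len+1) into [0, len) ++ [len, len+1); the tail filters to []
  have hch : char.toList ≠ [] := by
    intro h
    exact hpre (String.toList_eq_nil_iff.mp h)
  rw [PySem.List.pyRange_one_append 0 (s.toList.length : Int) ((s.toList.length : Int) + 1)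
    (by omega) (by omega), List.filter_append]
  have htail : (PySem.List.pyRange (s.toList.length : Int) ((s.toList.length : Int) + 1)).filter
      (fun i => PySem.Chars.startswith (s.toList.drop i.toNat) char.toList) = [] := by
    apply filter_pyRange_eq_nil
    intro i h1 h2
    have : i.toNat = s.toList.length := by omega
    rw [this, List.drop_length, Bool.eq_false_iff]
    intro hsw
    rw [PySem.Chars.startswith_iff, List.prefix_nil] at hsw
    exact hch hsw
  rw [htail, List.append_nil]
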